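-- pv_equiv track=rewrite | github.com/ximingzizi/recommendserver | app/services/recommend_service.py | _extract_preferences
-- ===== SOURCE A (Python) =====
-- from typing import Any
--
-- ATTRIBUTE_FIELDS = ("category", "brand", "color", "style", "material", "pattern")
--
-- def _extract_preferences(query: str, products: list[dict[str, Any]]) -> dict[str, str]:
--     preferences: dict[str, str] = {}
--     for field in ATTRIBUTE_FIELDS:
--         values = []
--         for product in products:
--             value = product.get(field)
--             if value and value not in values:
--                 values.append(value)
--         for value in values:
--             if value in query:
--                 preferences[field] = value
--                 break
--     return preferences
-- ===== SOURCE B (Python) =====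
-- ATTRIBUTE_FIELDS = ("category", "brand", "color", "style", "material", "pattern")
--
-- def _first_match(query, field, products):
--     if not products:
--         return None
--     value = products[0].get(field)
--     if value and value in query:
--         return value
--     return _first_match(query, field, products[1:])
--
-- def _extract_preferences(query: str, products: list) -> dict:
--     matches = ((field, _first_match(query, field, products)) for field in ATTRIBUTE_FIELDS)
--     return {field: value for field, value in matches if value is not None}
-- ===== Notes on version B (the rewrite author's own statement) =====
-- stated objective: simpler
-- what changed: B replaces A's per-field build-a-deduplicated-value-list-then-scan and imperative dict mutation with a recursive first-match helper over the products (stopping at the first truthy value contained in the query) and a comprehension over the fields that assembles the result directly; deduping never changes which value matches first, and since the fields are distinct the comprehension reproduces A's insertion order.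
import Mathlib
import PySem

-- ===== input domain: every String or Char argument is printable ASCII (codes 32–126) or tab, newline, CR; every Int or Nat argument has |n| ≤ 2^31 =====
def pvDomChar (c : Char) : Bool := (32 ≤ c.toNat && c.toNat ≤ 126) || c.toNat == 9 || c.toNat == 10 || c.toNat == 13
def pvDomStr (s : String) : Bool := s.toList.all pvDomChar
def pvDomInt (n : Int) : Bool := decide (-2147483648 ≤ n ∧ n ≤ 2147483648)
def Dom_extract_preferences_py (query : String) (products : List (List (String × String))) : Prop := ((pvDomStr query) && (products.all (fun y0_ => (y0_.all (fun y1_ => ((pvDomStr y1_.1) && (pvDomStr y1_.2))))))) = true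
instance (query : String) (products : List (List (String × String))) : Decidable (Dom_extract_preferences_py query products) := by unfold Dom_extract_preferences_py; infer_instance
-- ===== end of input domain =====

-- B replaces A's per-field dedup-list-then-scan with a recursive first-match helper over the
-- products plus a comprehension over the distinct fields (objective: simpler — deduping never
-- changes which value matches first, and distinct fields make the comprehension keep A's order).

-- ===== PORT A =====
-- module constant ATTRIBUTE_FIELDS (shared by both ports, as in the Python module)
def attributeFields : List String := ["category", "brand", "color", "style", "material", "pattern"]

def extract_preferences_py (query : String) (products : List (List (String × String))) : List (String × String) :=
  (attributeFields.foldl (fun (preferences : PySem.Dict String String) field =>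
------ values = []; for product in products: value = product.get(field); if value and value not in values: values.append(value)
    let values : List String := products.foldl (fun values product =>
      match (PySem.Dict.mk product).get? field with
      | some value => if value ≠ "" ∧ value ∉ values then values ++ [value] else values
      | none => values) []
------ for value in values: if value in query: preferences[field] = value; break
    match values.find? (fun value => PySem.Str.isIn value query) with
    | some value => preferences.insert field value
    | none => preferences) (PySem.Dict.mk [])).items

-- ===== PORT B =====
------ def _first_match(query, field, products): recursion on the product list
def firstMatch (query field : String) : List (List (String × String)) → Option String
  | [] => none
  | product :: rest =>
    match (PySem.Dict.mk product).get? field with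
    | some value =>
        if value ≠ "" ∧ PySem.Str.isIn value query then some value
        else firstMatch query field rest
    | none => firstMatch query field rest

------ generator over the fields + dict comprehension keeping only the non-None matches
def extract_preferences_py_alt (query : String) (products : List (List (String × String))) : List (String × String) :=
  (attributeFields.map (fun field => (field, firstMatch query field products))).filterMap
    (fun fv => fv.2.map (fun value => (fv.1, value)))

-- ===== PRECONDITION & SPEC =====
def Spec_extract_preferences_py (query : String) (products : List (List (String × String))) (out : List (String × String)) : Prop := out = extract_preferences_py_alt query products
instance (query : String) (products : List (List (String × String))) (out : List (String × String)) : Decidable (Spec_extract_preferences_py query products out) := by unfold Spec_extract_preferences_py; infer_instance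

-- ===== CLAIM (what is proved, stated in full; the proofs are below) =====
def Claim_equal_extract_preferences_py : Prop := ∀ (query : String) (products : List (List (String × String))), Dom_extract_preferences_py query products → Spec_extract_preferences_py query products (extract_preferences_py query products)

-- ===== LEMMAS AND PROOFS =====

-- Scanning A's deduplicated value list for the first query match equals B's recursive
-- first-match over the products, for any accumulator `values`.
lemma pick_eq (query field : String) :
    ∀ (ps : List (List (String × String))) (values : List String),
      (ps.foldl (fun values product =>
          match (PySem.Dict.mk product).get? field with
          | some value => if value ≠ "" ∧ value ∉ values then values ++ [value] else values
          | none => values) values).find? (fun value => PySem.Str.isIn value query)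
      = (values.find? (fun value => PySem.Str.isIn value query)).or
          (firstMatch query field ps) := by
  intro ps
  induction ps with
  | nil => intro values; simp [firstMatch]
  | cons p ps ih =>
    intro values
    simp only [List.foldl_cons, firstMatch]
    cases hg : (PySem.Dict.mk p).get? field with
    | none => simpa using ih values
    | some v =>
      by_cases hv : v = ""
      · subst hv; simpa using ih values
      · by_cases hm : v ∈ values
        · -- duplicate value: A keeps `values`; B's test on v is redundant
          dsimp only
          rw [if_neg (by simp [hm]), ih values]
          cases hf : values.find? (fun value => PySem.Str.isIn value query) with
          | some w => simp
          | none =>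
            have hnv : PySem.Chars.isIn v.toList query.toList = false := by
              have := List.find?_eq_none.mp hf v hm
              simpa using this
            simp [hnv, hv]
        · dsimp only
          rw [if_pos ⟨hv, hm⟩, ih (values ++ [v])]
          rw [List.find?_append]
          by_cases hq : PySem.Chars.isIn v.toList query.toList = true
          · simp [hq, hv]
          · simp [hq, hv]

-- A's fold over fresh distinct fields, each conditionally inserted, appends exactly the
-- (field, match) pairs B's comprehension produces.
lemma outer_eq (query : String) (products : List (List (String × String))) :
    ∀ (fs : List String) (d : PySem.Dict String String),
      fs.Nodup → (∀ f ∈ fs, d.contains f = false) →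
      (fs.foldl (fun (preferences : PySem.Dict String String) field =>
        match firstMatch query field products with
        | some value => preferences.insert field value
        | none => preferences) d).items
      = d.items ++ (fs.map (fun field => (field, firstMatch query field products))).filterMap
          (fun fv => fv.2.map (fun value => (fv.1, value))) := by
  intro fs
  induction fs with
  | nil => intro d _ _; simp
  | cons f fs ih =>
    intro d hnd hfresh
    simp only [List.foldl_cons, List.map_cons, List.filterMap_cons]
    cases hm : firstMatch query f products with
    | none =>
      simp only [Option.map_none]
      exact ih d (List.nodup_cons.mp hnd).2 (fun g hg => hfresh g (List.mem_cons_of_mem f hg))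
    | some v =>
      simp only [Option.map_some]
      rw [ih (d.insert f v) (List.nodup_cons.mp hnd).2 ?fresh]
      · rw [PySem.Dict.items_insert_of_not_contains (h := hfresh f (List.mem_cons_self))]
        simp
      case fresh =>
        intro g hg
        rw [PySem.Dict.contains_insert]
        have hne : g ≠ f := fun h => (List.nodup_cons.mp hnd).1 (h ▸ hg)
        simp [hne, hfresh g (List.mem_cons_of_mem f hg)]

-- ===== VERDICT (by name: the statement is the Claim_ definition above) =====
theorem extract_preferences_py_spec : Claim_equal_extract_preferences_py := by
  intro query products _
  show _ = _
  unfold extract_preferences_py extract_preferences_py_alt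
  have hstep : ∀ (d : PySem.Dict String String) (field : String),
      (let values : List String := products.foldl (fun values product =>
        match (PySem.Dict.mk product).get? field with
        | some value => if value ≠ "" ∧ value ∉ values then values ++ [value] else values
        | none => values) []
      match values.find? (fun value => PySem.Str.isIn value query) with
      | some value => d.insert field value
      | none => d)
      = match firstMatch query field products with
        | some value => d.insert field value
        | none => d := by
    intro d field
    simp only [pick_eq query field products [], List.find?_nil, Option.none_or]
  calc (attributeFields.foldl (fun (preferences : PySem.Dict String String) field =>
          let values : List String := products.foldl (fun values product =>
            match (PySem.Dict.mk product).get? field with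
            | some value => if value ≠ "" ∧ value ∉ values then values ++ [value] else values
            | none => values) []
          match values.find? (fun value => PySem.Str.isIn value query) with
          | some value => preferences.insert field value
          | none => preferences) (PySem.Dict.mk [])).items
      = (attributeFields.foldl (fun (preferences : PySem.Dict String String) field =>
          match firstMatch query field products with
          | some value => preferences.insert field value
          | none => preferences) (PySem.Dict.mk [])).items := by
        congr 1
        exact congrArg (fun g => List.foldl g ((PySem.Dict.mk []) : PySem.Dict String String) attributeFields)
          (funext fun d => funext fun f => hstep d f)
    _ = _ := by
        rw [outer_eq query products attributeFields (PySem.Dict.mk []) (by decide) (by decide)]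
        rfl
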